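-- pv_equiv track=rewrite | github.com/akikuno/DAJIN2 | src/DAJIN2/core/preprocess/midsv_caller.py | convert_consecutive_indels_to_match
-- ===== SOURCE A (Python) =====
-- def convert_consecutive_indels_to_match(cssplit: str) -> str:
--     i = 0
--     cssplit_reversed = cssplit.split(",")[::-1]
--     while i < len(cssplit_reversed):
--         current_cs = cssplit_reversed[i]
--
--         if not current_cs.startswith("+"):
--             i += 1
--             continue
--
--         insertions = [base.lstrip("+") for base in current_cs.split("|")[:-1]][::-1]
--
--         # Extract deletions
--         deletions = []
--
--         for j in range(1, len(insertions) + 1):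
--             if i + j >= len(cssplit_reversed):
--                 break
--
--             next_cs = cssplit_reversed[i + j]
--
--             if not next_cs.startswith("-"):
--                 break
--
--             deletions.append(next_cs.lstrip("-"))
--
--         if insertions != deletions:
--             i += 1
--             continue
--
--         # Format insertions
--         cssplit_reversed[i] = current_cs.split("|")[-1]
--
--         # Format deletions
--         for k, insertion in enumerate(insertions, 1):
--             cssplit_reversed[i + k] = cssplit_reversed[i + k].replace("-", "=")
--
--         i += len(insertions) + 1
--
--     return ",".join(cssplit_reversed[::-1])
-- ===== SOURCE B (Python) =====
-- def convert_consecutive_indels_to_match(cssplit: str) -> str: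
--     # Single forward pass: buffer the stripped values of the current trailing run of
--     # '-' tokens; on a '+' token whose insertion segments equal that trailing run,
--     # rewrite the buffered deletions in place and collapse the '+' token.
--     out = []
--     del_run = []  # lstripped values of the consecutive '-' tokens just appended to out
--     for token in cssplit.split(","):
--         if token.startswith("-"):
--             out.append(token)
--             del_run.append(token.lstrip("-"))
--             continue
--         if token.startswith("+"):
--             segs = [base.lstrip("+") for base in token.split("|")[:-1]]
--             n = len(segs)
--             if n <= len(del_run) and del_run[len(del_run) - n:] == segs:
--                 out[len(out) - n:] = [t.replace("-", "=") for t in out[len(out) - n:]]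
--                 out.append(token.split("|")[-1])
--             else:
--                 out.append(token)
--         else:
--             out.append(token)
--         del_run = []
--     return ",".join(out)
-- ===== Notes on version B (the rewrite author's own statement) =====
-- stated objective: alternative
-- what changed: Replaces the reversed-list while loop with index jumps and lookahead by a single forward pass that buffers the trailing run of deletion tokens and rewrites them in place when a matching insertion token arrives.
import Mathlib
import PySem

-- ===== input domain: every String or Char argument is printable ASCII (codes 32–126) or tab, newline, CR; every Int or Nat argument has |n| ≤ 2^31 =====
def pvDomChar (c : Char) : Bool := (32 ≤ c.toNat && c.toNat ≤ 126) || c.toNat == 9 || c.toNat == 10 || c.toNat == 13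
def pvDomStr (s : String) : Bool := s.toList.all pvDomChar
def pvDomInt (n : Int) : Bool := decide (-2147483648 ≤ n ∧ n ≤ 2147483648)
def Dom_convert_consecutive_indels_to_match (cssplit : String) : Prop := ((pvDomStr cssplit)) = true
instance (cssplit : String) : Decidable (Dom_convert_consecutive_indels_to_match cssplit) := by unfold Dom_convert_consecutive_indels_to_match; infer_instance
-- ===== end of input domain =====

-- B replaces A's reversed-list while loop (lookahead + index jumps) by one forward pass with a
-- buffer of the trailing deletion run; same return value, same cost (objective: alternative).

-- shared primitives (both Pythons call the same built-ins):
-- exact port of str.lstrip(c) for a single strip character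
def pyLstrip (s : String) (c : Char) : String := String.ofList (s.toList.dropWhile (· == c))
-- s.split(sep) for the nonempty literal separators "," and "|": split? is `some` there
def pySplit (s sep : String) : List String := (PySem.Str.split? s sep).getD []
-- [base.lstrip("+") for base in token.split("|")[:-1]]  (this list comprehension appears verbatim in both Pythons)
def plusSegs (t : String) : List String :=
  ((pySplit t "|").dropLast).map (fun b => pyLstrip b '+')

-- ===== PORT A =====
-- the 'for j in range(1, len(insertions)+1)' collection loop with its two breaks
def aCollect : Nat → List String → List String
  | 0, _ => []
  | _ + 1, [] => []
  | n + 1, t :: rest =>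
    if PySem.Str.startswith t "-" then pyLstrip t '-' :: aCollect n rest else []

-- the while loop over the reversed token list: elements before i are final and never re-read, so
-- the loop is the structural recursion on the remaining suffix (writes happen at i..i+k, then skipped)
def aRun : List String → List String
  | [] => []
  | c :: rest =>
    if ¬ (PySem.Str.startswith c "+" = true) then c :: aRun rest
    else
      let insertions := (plusSegs c).reverse
      let deletions := aCollect insertions.length rest
      if insertions ≠ deletions then c :: aRun rest
      else ((pySplit c "|").getLastD "") ::
             ((rest.take insertions.length).map (fun t => PySem.Str.replace t "-" "=")) ++
             aRun (rest.drop insertions.length)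
  termination_by l => l.length
  decreasing_by
    · simp
    · simp
    · simp only [List.length_drop, List.length_cons]; omega

def convert_consecutive_indels_to_match (cssplit : String) : String :=
  PySem.Str.join "," ((aRun ((pySplit cssplit ",").reverse)).reverse)

-- ===== PORT B =====
-- state = (out, del_run); one step of Source B's for loop
def bStep (s : List String × List String) (t : String) : List String × List String :=
  if PySem.Str.startswith t "-" then (s.1 ++ [t], s.2 ++ [pyLstrip t '-'])
  else if PySem.Str.startswith t "+" then
    let segs := plusSegs t
    let n := segs.length
    if n ≤ s.2.length ∧ s.2.drop (s.2.length - n) = segs then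
      (s.1.take (s.1.length - n) ++
         ((s.1.drop (s.1.length - n)).map (fun u => PySem.Str.replace u "-" "=")) ++
         [(pySplit t "|").getLastD ""], [])
    else (s.1 ++ [t], [])
  else (s.1 ++ [t], [])

def convert_consecutive_indels_to_match_alt (cssplit : String) : String :=
  PySem.Str.join "," (((pySplit cssplit ",").foldl bStep ([], [])).1)

-- ===== PRECONDITION & SPEC =====
def Spec_convert_consecutive_indels_to_match (cssplit : String) (out : String) : Prop := out = convert_consecutive_indels_to_match_alt cssplit
instance (cssplit : String) (out : String) : Decidable (Spec_convert_consecutive_indels_to_match cssplit out) := by unfold Spec_convert_consecutive_indels_to_match; infer_instance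

-- ===== CLAIM (what is proved, stated in full; the proofs are below) =====
def Claim_equal_convert_consecutive_indels_to_match : Prop := ∀ (cssplit : String), Dom_convert_consecutive_indels_to_match cssplit → Spec_convert_consecutive_indels_to_match cssplit (convert_consecutive_indels_to_match cssplit)

-- ===== LEMMAS AND PROOFS =====

def isDash (t : String) : Bool := PySem.Str.startswith t "-"

-- B's del_run after processing tokens rs.reverse = stripped leading '-'-run of rs, reversed
def runOf (l : List String) : List String :=
  ((l.takeWhile isDash).map (fun t => pyLstrip t '-')).reverse

lemma not_plus_of_dash {t : String} (h : isDash t = true) :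
    ¬ (PySem.Str.startswith t "+" = true) := by
  intro h'
  simp only [isDash, PySem.Str.startswith_eq] at h h'
  rw [PySem.Chars.startswith_iff] at h h'
  rcases h with ⟨u, hu⟩; rcases h' with ⟨v, hv⟩
  rw [show ("-" : String).toList = ['-'] from rfl] at hu
  rw [show ("+" : String).toList = ['+'] from rfl] at hv
  rw [← hv] at hu; simp at hu

-- closed form of the j-loop: stripped dash-prefix of the first n lookahead tokens
lemma aCollect_eq (n : Nat) (l : List String) :
    aCollect n l = ((l.take n).takeWhile isDash).map (fun t => pyLstrip t '-') := by
  induction n generalizing l with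
  | zero => simp [aCollect]
  | succ n ih =>
    cases l with
    | nil => simp [aCollect]
    | cons t rest =>
      simp only [aCollect, List.take_succ_cons, List.takeWhile_cons, isDash,
        PySem.Str.startswith_eq]
      by_cases h : PySem.Chars.startswith t.toList ['-'] = true
      · simp [h, ih]
      · simp [h]

-- A's loop passes over a prefix of deletion tokens unchanged
lemma aRun_dash_prefix (n : Nat) (l : List String)
    (h : n ≤ (l.takeWhile isDash).length) :
    aRun l = l.take n ++ aRun (l.drop n) := by
  induction n generalizing l with
  | zero => simp
  | succ n ih =>
    cases l with
    | nil => simp at h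
    | cons c rest =>
      by_cases hc : isDash c = true
      · rw [aRun, if_pos (not_plus_of_dash hc)]
        simp only [List.takeWhile_cons, hc, if_true, List.length_cons] at h
        simp only [List.take_succ_cons, List.drop_succ_cons, List.cons_append]
        rw [ih rest (by omega)]
      · simp [hc] at h

-- the two match tests agree: B's trailing-slice comparison ↔ A's lookahead collection
lemma cond_iff (segs rest : List String) :
    (segs.length ≤ (runOf rest).length ∧
       (runOf rest).drop ((runOf rest).length - segs.length) = segs)
    ↔ segs.reverse = aCollect segs.length rest := by
  have e1 : aCollect segs.length rest =
      (((rest.takeWhile isDash).map (fun t => pyLstrip t '-')).take segs.length) := by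
    rw [aCollect_eq, ← List.take_takeWhile, List.map_take]
  rw [e1, runOf]
  set L := (rest.takeWhile isDash).map (fun t => pyLstrip t '-') with hL
  constructor
  · rintro ⟨h1, h2⟩
    rw [List.length_reverse] at h2
    rw [← List.reverse_take] at h2
    exact (List.reverse_eq_iff.mp h2).symm
  · intro h
    have hlen : (L.take segs.length).length = segs.reverse.length := by rw [← h]
    simp only [List.length_take, List.length_reverse] at hlen
    constructor
    · rw [List.length_reverse]; omega
    · rw [List.length_reverse, ← List.reverse_take, ← h, List.reverse_reverse]

-- main invariant: B's fold over the tokens in forward order, versus A's pass over the reversed list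
lemma fold_eq (rs : List String) :
    List.foldl bStep ([], []) rs.reverse = ((aRun rs).reverse, runOf rs) := by
  induction rs with
  | nil => simp [aRun, runOf]
  | cons c rest ih =>
    rw [List.reverse_cons, List.foldl_append, ih, List.foldl_cons, List.foldl_nil]
    by_cases hd : isDash c = true
    · rw [aRun, if_pos (not_plus_of_dash hd)]
      simp only [bStep]
      rw [if_pos (show PySem.Str.startswith c "-" = true from hd)]
      simp [runOf, hd]
    · by_cases hp : PySem.Str.startswith c "+" = true
      · have hrun0 : runOf (c :: rest) = [] := by
          simp [runOf, hd]
        rw [aRun, if_neg (by simpa using hp)]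
        simp only [bStep]
        rw [if_neg (by simpa [isDash] using hd), if_pos hp]
        simp only [List.length_reverse]
        by_cases hc : (plusSegs c).length ≤ (runOf rest).length ∧
            (runOf rest).drop ((runOf rest).length - (plusSegs c).length) = plusSegs c
        · have hmatch := (cond_iff (plusSegs c) rest).mp hc
          rw [if_pos hc, if_neg (not_ne_iff.mpr hmatch)]
          have hn : (plusSegs c).length ≤ (rest.takeWhile isDash).length := by
            have h1 := hc.1
            simpa [runOf] using h1
          have hnr : (plusSegs c).length ≤ rest.length :=
            le_trans hn (List.takeWhile_sublist _).length_le
          have hsk := aRun_dash_prefix (plusSegs c).length rest hn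
          have htlen : (rest.take (plusSegs c).length).length = (plusSegs c).length := by
            simp [hnr]
          rw [hrun0]
          have hout : (aRun rest).reverse =
              (aRun (rest.drop (plusSegs c).length)).reverse ++
                (rest.take (plusSegs c).length).reverse := by
            rw [hsk, List.reverse_append]
          refine Prod.ext ?_ ?_
          · have hk : (aRun rest).length - (plusSegs c).length =
                (aRun (rest.drop (plusSegs c).length)).reverse.length := by
              rw [hsk]; simp [htlen]
            rw [hout, hk, List.take_left' rfl, List.drop_left' rfl]
            simp [List.reverse_append, List.map_reverse]
          · rfl
        · have hnm := (not_iff_not.mpr (cond_iff (plusSegs c) rest)).mp hc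
          rw [if_neg hc, if_pos hnm]
          rw [hrun0]
          exact Prod.ext (by simp) rfl
      · rw [aRun, if_pos (by simpa using hp)]
        simp only [bStep]
        rw [if_neg (by simpa [isDash] using hd), if_neg hp]
        refine Prod.ext (by simp) ?_
        simp [runOf, hd]

-- ===== VERDICT (by name: the statement is the Claim_ definition above) =====
theorem convert_consecutive_indels_to_match_spec : Claim_equal_convert_consecutive_indels_to_match := by
  intro cssplit _
  unfold Spec_convert_consecutive_indels_to_match
  unfold convert_consecutive_indels_to_match convert_consecutive_indels_to_match_alt
  have h := fold_eq ((pySplit cssplit ",").reverse)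
  rw [List.reverse_reverse] at h
  rw [h]
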